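-- pv_equiv track=rewrite | github.com/aeec21/python-2 | Python-2/test_python_hack_2/hack_5.py | fn_hack_5
-- ===== SOURCE A (Python) =====
-- def fn_hack_5(texto, posicion=[2, 5, 8]):
--     result = ""
--     for palabra in texto.split():
--         if palabra.startswith("foo"):
--             result += "fo-zi-ma-"
--         else:
--             nueva_palabra = ""
--             for i, char in enumerate(palabra):
--                 if i in posicion:
--                     nueva_palabra += "-"
--                 else:
--                     nueva_palabra += char
--             result += nueva_palabra + " "
--     return result.strip()
-- ===== SOURCE B (Python) =====
-- def fn_hack_5(texto, posicion=[2, 5, 8]):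
--     def transform(palabra):
--         if palabra.startswith("foo"):
--             return "fo-zi-ma-"
--         chars = list(palabra)
--         for p in posicion:
--             if 0 <= p < len(chars):
--                 chars[p] = '-'
--         return ''.join(chars) + ' '
--     return ''.join(transform(w) for w in texto.split()).strip()
-- ===== Notes on version B (the rewrite author's own statement) =====
-- stated objective: idiomatic
-- what changed: Per word, instead of scanning every character with an 'i in posicion' membership test, B mutates a char list at the (in-range) replacement indices and joins the per-word pieces once at the end instead of accumulating by string concatenation.
import Mathlib
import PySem

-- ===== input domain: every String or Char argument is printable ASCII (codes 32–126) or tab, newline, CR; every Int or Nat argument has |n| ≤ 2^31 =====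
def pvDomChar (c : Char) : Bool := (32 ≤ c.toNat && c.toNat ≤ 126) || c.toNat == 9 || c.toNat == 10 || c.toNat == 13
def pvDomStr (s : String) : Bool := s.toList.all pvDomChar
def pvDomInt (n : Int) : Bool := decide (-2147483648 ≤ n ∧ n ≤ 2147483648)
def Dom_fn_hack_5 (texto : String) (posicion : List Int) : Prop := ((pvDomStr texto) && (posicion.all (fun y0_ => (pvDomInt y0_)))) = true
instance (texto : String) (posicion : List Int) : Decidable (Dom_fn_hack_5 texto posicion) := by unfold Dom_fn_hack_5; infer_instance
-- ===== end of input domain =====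

-- B replaces the per-character membership scan by index mutation over posicion and a single join; same result, proved equal on all inputs.

-- ===== PORT A =====
def fn_hack_5 (texto : String) (posicion : List Int) : String :=
  let result : List Char :=
    (PySem.Chars.split₀ texto.toList).foldl (fun result palabra =>
      if PySem.Chars.startswith palabra "foo".toList then
        result ++ "fo-zi-ma-".toList
      else
        let nueva_palabra : List Char :=
          (PySem.List.enumerate palabra).foldl
            (fun np p => if p.1 ∈ posicion then np ++ ['-'] else np ++ [p.2]) []
        result ++ (nueva_palabra ++ [' '])) []
  String.mk (PySem.Chars.strip result)

-- ===== PORT B =====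
def pvTransform (posicion : List Int) (palabra : List Char) : List Char :=
  if PySem.Chars.startswith palabra "foo".toList then "fo-zi-ma-".toList
  else
    (posicion.foldl
      (fun chars p => if 0 ≤ p ∧ p < (chars.length : Int) then chars.set p.toNat '-' else chars)
      palabra) ++ [' ']

def fn_hack_5_alt (texto : String) (posicion : List Int) : String :=
  String.mk (PySem.Chars.strip
    (PySem.Chars.join [] ((PySem.Chars.split₀ texto.toList).map (pvTransform posicion))))

-- ===== PRECONDITION & SPEC =====
def Spec_fn_hack_5 (texto : String) (posicion : List Int) (out : String) : Prop := out = fn_hack_5_alt texto posicion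
instance (texto : String) (posicion : List Int) (out : String) : Decidable (Spec_fn_hack_5 texto posicion out) := by unfold Spec_fn_hack_5; infer_instance

-- ===== CLAIM (what is proved, stated in full; the proofs are below) =====
def Claim_equal_fn_hack_5 : Prop := ∀ (texto : String) (posicion : List Int), Dom_fn_hack_5 texto posicion → Spec_fn_hack_5 texto posicion (fn_hack_5 texto posicion)

-- ===== LEMMAS AND PROOFS =====

-- join with the empty separator is flatten
theorem pv_intercalate_nil (ps : List (List Char)) : ([] : List Char).intercalate ps = ps.flatten := by
  induction ps with
  | nil => simp [List.intercalate]
  | cons p ps ih =>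
    cases ps with
    | nil => simp [List.intercalate]
    | cons q qs =>
      rw [show ([] : List Char).intercalate (p :: q :: qs) = p ++ ([] : List Char).intercalate (q :: qs) from by
        simp [List.intercalate, List.intersperse]]
      rw [ih]; simp

theorem pv_join_nil (ps : List (List Char)) : PySem.Chars.join [] ps = ps.flatten := by
  simpa [PySem.Chars.join] using pv_intercalate_nil ps

-- the index-mutation fold of B: length preserved, pointwise set where the index is in posicion
theorem pv_setfold_length (posicion : List Int) (l : List Char) :
    (posicion.foldl
      (fun chars p => if 0 ≤ p ∧ p < (chars.length : Int) then chars.set p.toNat '-' else chars)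
      l).length = l.length := by
  induction posicion generalizing l with
  | nil => rfl
  | cons q qs ih =>
    simp only [List.foldl_cons]
    split <;> simp [ih]

theorem pv_setfold_get? (posicion : List Int) (l : List Char) (k : Nat) (hk : k < l.length) :
    (posicion.foldl
      (fun chars p => if 0 ≤ p ∧ p < (chars.length : Int) then chars.set p.toNat '-' else chars)
      l)[k]? = some (if (k : Int) ∈ posicion then '-' else l[k]) := by
  induction posicion generalizing l with
  | nil => simp [List.getElem?_eq_getElem hk]
  | cons q qs ih =>
    simp only [List.foldl_cons, List.mem_cons]
    by_cases hq : 0 ≤ q ∧ q < (l.length : Int)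
    · rw [if_pos hq, ih (l.set q.toNat '-') (by simpa using hk)]
      by_cases hmem : (k : Int) ∈ qs
      · simp [hmem]
      · by_cases hkq : (k : Int) = q
        · have h1 : q.toNat = k := by omega
          simp [hmem, hkq, h1, List.getElem_set]
        · have h1 : q.toNat ≠ k := by omega
          simp [hmem, hkq, List.getElem_set, h1]
    · rw [if_neg hq, ih l hk]
      have hkq : ¬ ((k : Int) = q) := by omega
      simp [hkq]

-- A's character-by-character word rebuild equals B's mutated list
theorem pv_word_eq (posicion : List Int) (palabra : List Char) :
    (PySem.List.enumerate palabra).foldl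
      (fun np p => if p.1 ∈ posicion then np ++ ['-'] else np ++ [p.2]) ([] : List Char)
    = posicion.foldl
      (fun chars p => if 0 ≤ p ∧ p < (chars.length : Int) then chars.set p.toNat '-' else chars)
      palabra := by
  have hfun : (fun (np : List Char) (p : Int × Char) =>
        if p.1 ∈ posicion then np ++ ['-'] else np ++ [p.2])
      = fun np p => np ++ [if p.1 ∈ posicion then '-' else p.2] := by
    funext np p; split <;> rfl
  rw [hfun, PySem.List.foldl_append_singleton_eq_map, List.nil_append]
  apply List.ext_getElem?
  intro k
  by_cases hk : k < palabra.length
  · rw [pv_setfold_get? posicion palabra k hk]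
    simp [List.getElem?_eq_getElem, hk, PySem.List.length_enumerate, PySem.List.getElem_enumerate]
  · rw [List.getElem?_eq_none, List.getElem?_eq_none]
    · rw [pv_setfold_length]; exact Nat.le_of_not_lt hk
    · simp only [List.length_map, PySem.List.length_enumerate]; exact Nat.le_of_not_lt hk

-- A's accumulating outer loop equals flatten of the per-word pieces
theorem pv_outer_eq (posicion : List Int) (words : List (List Char)) :
    words.foldl (fun result palabra =>
      if PySem.Chars.startswith palabra "foo".toList then
        result ++ "fo-zi-ma-".toList
      else
        result ++ (((PySem.List.enumerate palabra).foldl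
            (fun np p => if p.1 ∈ posicion then np ++ ['-'] else np ++ [p.2]) []) ++ [' ']))
      ([] : List Char)
    = (words.map (pvTransform posicion)).flatten := by
  have hfun : (fun (result : List Char) palabra =>
      if PySem.Chars.startswith palabra "foo".toList then
        result ++ "fo-zi-ma-".toList
      else
        result ++ (((PySem.List.enumerate palabra).foldl
            (fun np p => if p.1 ∈ posicion then np ++ ['-'] else np ++ [p.2]) []) ++ [' ']))
      = fun result palabra => result ++ pvTransform posicion palabra := by
    funext result palabra
    simp only [pvTransform]
    split <;> rename_i h <;> simp [h, pv_word_eq]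
  rw [hfun, PySem.List.foldl_append_eq_flatMap, List.nil_append, List.flatMap_def]

-- ===== VERDICT (by name: the statement is the Claim_ definition above) =====
theorem fn_hack_5_spec : Claim_equal_fn_hack_5 := by
  intro texto posicion _
  unfold Spec_fn_hack_5 fn_hack_5 fn_hack_5_alt
  rw [pv_join_nil, pv_outer_eq]
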